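-- pv_equiv track=rewrite | github.com/databricks/cli | tools/fuzz/test_fields.py | field_yaml_path
-- ===== SOURCE A (Python) =====
-- def field_yaml_path(field_path):
--     """Convert field path to YAML key path relative to resource instance.
--
--     'resources.jobs.*.name' -> ['name']
--     'resources.jobs.*.email_notifications.on_failure' -> ['email_notifications', 'on_failure']
--     'resources.jobs.*.tasks[*].task_key' -> None  (array elements not supported for simple insertion)
--
--     >>> field_yaml_path("resources.jobs.*.name")
--     ['name']
--     >>> field_yaml_path("resources.jobs.*.email_notifications.on_failure")
--     ['email_notifications', 'on_failure']
--     >>> field_yaml_path("resources.jobs.*.tasks[*].task_key") is None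
--     True
--     """
--     # Skip the "resources.<type>.*" prefix
--     parts = field_path.split(".")
--     if len(parts) < 4 or parts[0] != "resources" or parts[2] != "*":
--         return None
--     remainder = parts[3:]
--     # Skip fields that involve array indexing or map wildcards
--     for p in remainder:
--         if "[*]" in p or p == "*":
--             return None
--     return remainder
-- ===== SOURCE B (Python) =====
-- def field_yaml_path(field_path):
--     # Parse the fixed resources/type/star prefix by direct string scanning instead of
--     # splitting the whole path; wildcard screening done by substring tests on the
--     # remainder string (a component equals "*" iff ".*." occurs in the dot-wrapped
--     # remainder, and "[*]" contains no dot so it occurs iff it occurs in a component).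
--     if not field_path.startswith("resources."):
--         return None
--     rest = field_path[len("resources."):]
--     dot = rest.find(".")
--     if dot == -1 or not rest.startswith("*.", dot + 1):
--         return None
--     tail = rest[dot + 3:]
--     if "[*]" in tail or ".*." in "." + tail + ".":
--         return None
--     return tail.split(".")
-- ===== Notes on version B (the rewrite author's own statement) =====
-- stated objective: alternative
-- what changed: B never splits the whole path: it checks the fixed resources/type/star prefix by direct string scanning (startswith/find/slice) and screens wildcards with two substring tests on the remainder string ('[*]' in tail, '.*.' in the dot-wrapped tail), splitting only the remainder at the end; A splits first and then inspects parts by index and a per-component loop.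
import Mathlib
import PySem

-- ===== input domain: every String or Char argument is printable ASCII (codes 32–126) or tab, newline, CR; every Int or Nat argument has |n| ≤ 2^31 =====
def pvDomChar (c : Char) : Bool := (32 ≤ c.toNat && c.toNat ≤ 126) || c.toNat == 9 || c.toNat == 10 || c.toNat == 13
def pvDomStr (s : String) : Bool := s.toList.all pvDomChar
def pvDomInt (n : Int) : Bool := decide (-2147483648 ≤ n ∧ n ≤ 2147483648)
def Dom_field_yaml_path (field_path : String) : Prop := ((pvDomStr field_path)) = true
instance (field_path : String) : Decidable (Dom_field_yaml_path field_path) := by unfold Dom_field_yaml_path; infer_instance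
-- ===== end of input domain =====

-- B parses the fixed resources/type/star prefix by direct string scanning and screens
-- wildcards with substring tests on the remainder string, splitting only the
-- remainder; an alternative of the same cost, not claimed faster.

-- B parses the fixed resources/type/star prefix by direct string scanning (startswith/find/slice)
-- and screens wildcards with substring tests on the remainder string, splitting only the
-- remainder; an alternative of the same cost, not claimed faster.

-- ===== PORT A =====
def field_yaml_path (field_path : String) : Option (List String) :=
  let parts := (PySem.Str.split? field_path ".").getD []
  if parts.length < 4 ∨ PySem.List.pyGet? parts 0 ≠ some "resources" ∨ PySem.List.pyGet? parts 2 ≠ some "*" then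
    none
  else
    let remainder := PySem.List.slice parts (some 3) none
    if remainder.any (fun p => PySem.Str.isIn "[*]" p || p == "*") then none
    else some remainder

-- ===== PORT B =====
def field_yaml_path_alt (field_path : String) : Option (List String) :=
  if PySem.Str.startswith field_path "resources." = false then none
  else
    let rest := PySem.Str.slice field_path (some (PySem.Str.len "resources.")) none
    let dot := PySem.Str.find rest "."
    if dot = -1 ∨ PySem.Str.startswith (PySem.Str.slice rest (some (dot + 1)) none) "*." = false then none
    else
      let tail := PySem.Str.slice rest (some (dot + 3)) none
      if PySem.Str.isIn "[*]" tail || PySem.Str.isIn ".*." ("." ++ tail ++ ".") then none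
      else some ((PySem.Str.split? tail ".").getD [])


-- ===== PRECONDITION & SPEC =====
def Spec_field_yaml_path (field_path : String) (out : Option (List String)) : Prop := out = field_yaml_path_alt field_path
instance (field_path : String) (out : Option (List String)) : Decidable (Spec_field_yaml_path field_path out) := by unfold Spec_field_yaml_path; infer_instance

-- ===== CLAIM (what is proved, stated in full; the proofs are below) =====
def Claim_equal_field_yaml_path : Prop := ∀ (field_path : String), Dom_field_yaml_path field_path → Spec_field_yaml_path field_path (field_yaml_path field_path)

-- ===== LEMMAS AND PROOFS =====

-- structural model of Python's s.split(".")
def pvSplit : List Char → List (List Char)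
  | [] => [[]]
  | c :: rest => if c = '.' then [] :: pvSplit rest else (pvSplit rest).modifyHead (c :: ·)
theorem pvSplit_ne_nil (l : List Char) : pvSplit l ≠ [] := by
  induction l with
  | nil => simp [pvSplit]
  | cons c rest ih =>
    simp only [pvSplit]
    split
    · simp
    · cases h : pvSplit rest with
      | nil => exact absurd h ih
      | cons x xs => simp

theorem pvGo (fuel : Nat) : ∀ (l cur : List Char) (acc : List (List Char)), l.length < fuel →
    PySem.Chars.splitOn.go ['.'] fuel l cur acc = acc.reverse ++ (pvSplit l).modifyHead (cur.reverse ++ ·) := by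
  induction fuel with
  | zero => intro l cur acc h; omega
  | succ n ih =>
    intro l cur acc h
    cases l with
    | nil => simp [PySem.Chars.splitOn.go, pvSplit]
    | cons c rest =>
      by_cases hc : c = '.'
      · subst hc
        rw [PySem.Chars.splitOn.go]
        simp only [List.isPrefixOf, BEq.rfl, Bool.true_and, if_pos]
        simp only [List.length_cons, List.length_nil, Nat.zero_add, List.drop_one, List.tail_cons]
        rw [ih rest [] (cur.reverse :: acc) (by simpa using Nat.lt_of_succ_lt_succ h)]
        cases hr : pvSplit rest with
        | nil => exact absurd hr (pvSplit_ne_nil rest)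
        | cons x xs => simp [pvSplit, hr]
      · rw [PySem.Chars.splitOn.go]
        have : (['.'].isPrefixOf (c :: rest)) = false := by
          simp [List.isPrefixOf]; exact fun h => absurd h.symm hc
        rw [if_neg (by simp [this])]
        rw [ih rest (c :: cur) acc (by simpa using Nat.lt_of_succ_lt_succ h)]
        cases hr : pvSplit rest with
        | nil => exact absurd hr (pvSplit_ne_nil rest)
        | cons x xs => simp [pvSplit, hr, hc]

theorem splitOn_eq_pvSplit (l : List Char) : PySem.Chars.splitOn l ['.'] = pvSplit l := by
  rw [PySem.Chars.splitOn, pvGo (l.length + 1) l [] [] (by omega)]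
  cases hr : pvSplit l with
  | nil => exact absurd hr (pvSplit_ne_nil l)
  | cons x xs => simp
theorem pvSplit_no_dot {l : List Char} (h : '.' ∉ l) : pvSplit l = [l] := by
  induction l with
  | nil => simp [pvSplit]
  | cons c rest ih =>
    simp only [List.mem_cons, not_or] at h
    have hc : ¬ c = '.' := fun hh => h.1 (Eq.symm hh)
    simp [pvSplit, hc, ih h.2]

theorem pvSplit_append {a : List Char} (b : List Char) (h : '.' ∉ a) :
    pvSplit (a ++ '.' :: b) = a :: pvSplit b := by
  induction a with
  | nil => simp [pvSplit]
  | cons c rest ih =>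
    simp only [List.mem_cons, not_or] at h
    have hc : ¬ c = '.' := fun hh => h.1 (Eq.symm hh)
    simp [pvSplit, hc, ih h.2]

theorem pvDecomp (l : List Char) : '.' ∉ l ∨ ∃ a b, l = a ++ '.' :: b ∧ '.' ∉ a := by
  induction l with
  | nil => simp
  | cons c rest ih =>
    by_cases hc : c = '.'
    · subst hc; exact Or.inr ⟨[], rest, by simp⟩
    · rcases ih with h | ⟨a, b, rfl, ha⟩
      · exact Or.inl (by simp [h]; exact fun hh => hc (Eq.symm hh))
      · refine Or.inr ⟨c :: a, b, by simp, ?_⟩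
        simp [ha]; exact fun hh => hc (Eq.symm hh)

theorem pvSingleton_infix {c : Char} {l : List Char} : [c] <:+: l ↔ c ∈ l := by
  constructor
  · intro h; exact h.sublist.subset (by simp)
  · intro h
    obtain ⟨s, t, rfl⟩ := List.append_of_mem h
    exact ⟨s, t, by simp⟩

theorem pvFind_no_dot {b : List Char} (h : '.' ∉ b) : PySem.Chars.find b ['.'] = -1 := by
  rw [PySem.Chars.find_eq_neg_one_iff]
  rw [pvSingleton_infix]
  exact h

theorem pvFind_first_dot {t : List Char} (u : List Char) (h : '.' ∉ t) :
    PySem.Chars.find (t ++ '.' :: u) ['.'] = (t.length : Int) := by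
  have hmem : '.' ∈ t ++ '.' :: u := by simp
  have hnn : 0 ≤ PySem.Chars.find (t ++ '.' :: u) ['.'] := by
    rw [PySem.Chars.find_nonneg_iff, pvSingleton_infix]; exact hmem
  obtain ⟨hpre, hmin⟩ := PySem.Chars.find_spec hnn
  set n := (PySem.Chars.find (t ++ '.' :: u) ['.']).toNat with hn
  have hlen : ¬ t.length < n := by
    intro hlt
    refine absurd (hmin t.length hlt) ?_
    rw [List.drop_left]
    simp
  have hge : ¬ n < t.length := by
    intro hlt
    have : ['.'] <+: List.drop n t ++ '.' :: u := by
      rwa [List.drop_append_of_le_length (le_of_lt hlt)] at hpre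
    have hne : List.drop n t ≠ [] := by simp [hlt]
    obtain ⟨d, ds, hdds⟩ := List.exists_cons_of_ne_nil hne
    rw [hdds] at this
    have hdd : d = '.' := by
      rcases this with ⟨r, hr⟩
      simpa using congrArg List.head? hr.symm
    have : d ∈ t := (List.drop_subset n t) (hdds ▸ List.mem_cons_self)
    exact h (hdd ▸ this)
  have : n = t.length := by omega
  omega
theorem pvPrefix_no_dot {sub a b : List Char} (hs : '.' ∉ sub) (h : sub <+: a ++ '.' :: b) :
    sub <+: a := by
  induction a generalizing sub with
  | nil =>
    cases sub with
    | nil => exact List.nil_prefix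
    | cons s ss =>
      simp only [List.nil_append] at h
      rw [List.cons_prefix_cons] at h
      exact absurd (h.1 ▸ List.mem_cons_self) hs
  | cons x a' ih =>
    cases sub with
    | nil => exact List.nil_prefix
    | cons s ss =>
      simp only [List.cons_append] at h
      rw [List.cons_prefix_cons] at h
      simp only [List.mem_cons, not_or] at hs
      exact List.cons_prefix_cons.mpr ⟨h.1, ih hs.2 h.2⟩

theorem pvInfix_straddle {sub : List Char} (a b : List Char) (hne : sub ≠ []) (hs : '.' ∉ sub) :
    sub <:+: a ++ '.' :: b ↔ sub <:+: a ∨ sub <:+: b := by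
  induction a with
  | nil =>
    simp only [List.nil_append, List.infix_cons_iff]
    constructor
    · rintro (hp | hi)
      · cases sub with
        | nil => exact absurd rfl hne
        | cons s ss =>
          rw [List.cons_prefix_cons] at hp
          exact absurd (hp.1 ▸ List.mem_cons_self) hs
      · exact Or.inr hi
    · rintro (hp | hi)
      · rw [List.infix_nil] at hp; exact absurd hp hne
      · exact Or.inr hi
  | cons x a' ih =>
    simp only [List.cons_append, List.infix_cons_iff, ih, List.infix_cons_iff (l₂ := a')]
    constructor
    · rintro (hp | hi | hi)
      · exact Or.inl (Or.inl (pvPrefix_no_dot hs (by simpa using hp)))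
      · exact Or.inl (Or.inr hi)
      · exact Or.inr hi
    · rintro ((hp | hi) | hi)
      · rcases hp with ⟨t, ht⟩
        exact Or.inl ⟨t ++ '.' :: b, by rw [← List.append_assoc, ht]; simp⟩
      · exact Or.inr (Or.inl hi)
      · exact Or.inr (Or.inr hi)

theorem pvL1 {sub : List Char} (v : List Char) (hne : sub ≠ []) (hs : '.' ∉ sub) :
    sub <:+: v ↔ ∃ p ∈ pvSplit v, sub <:+: p := by
  induction hv : v.length using Nat.strong_induction_on generalizing v with
  | _ n ih =>
  rcases pvDecomp v with h | ⟨a, b, rfl, ha⟩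
  · simp [pvSplit_no_dot h]
  · rw [pvSplit_append b ha, pvInfix_straddle a b hne hs,
      ih b.length (by subst hv; simp; omega) b rfl]
    simp
theorem pvR0 {w : List Char} (h : '.' ∉ w) : ¬ (['.', '*', '.'] <:+: w ++ ['.']) := by
  induction w with
  | nil => intro hh; have := hh.length_le; simp at this
  | cons y w' ih =>
    intro hh
    simp only [List.cons_append, List.infix_cons_iff] at hh
    simp only [List.mem_cons, not_or] at h
    rcases hh with hp | hi
    · rw [List.cons_prefix_cons] at hp
      exact h.1 hp.1
    · exact ih h.2 hi

theorem pvR {v : List Char} (h : '.' ∉ v) :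
    ['.', '*', '.'] <:+: '.' :: v ++ ['.'] ↔ v = ['*'] := by
  constructor
  · intro hh
    rcases (List.infix_cons_iff).1 (by simpa using hh) with hp | hi
    · rw [List.cons_prefix_cons] at hp
      rcases hp with ⟨-, hp⟩
      cases v with
      | nil =>
        simp only [List.nil_append] at hp
        rw [List.cons_prefix_cons] at hp
        simp at hp
      | cons y v' =>
        simp only [List.cons_append, List.cons_prefix_cons] at hp
        rcases hp with ⟨hy, hp⟩
        cases v' with
        | nil => simp [← hy]
        | cons z v'' =>
          simp only [List.cons_append, List.cons_prefix_cons] at hp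
          simp only [List.mem_cons, not_or] at h
          exact absurd hp.1 h.2.1
    · exact absurd hi (pvR0 h)
  · rintro rfl
    exact List.infix_refl _

theorem pvR2 {a : List Char} (w : List Char) (ha : '.' ∉ a) :
    ['.', '*', '.'] <:+: a ++ '.' :: w ↔ ['.', '*', '.'] <:+: '.' :: w := by
  induction a with
  | nil => simp
  | cons y a' ih =>
    simp only [List.mem_cons, not_or] at ha
    constructor
    · intro hh
      rw [List.cons_append] at hh
      rcases List.infix_cons_iff.1 hh with hp | hi
      · rw [List.cons_prefix_cons] at hp
        exact absurd hp.1 ha.1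
      · exact (ih ha.2).1 hi
    · intro hh
      rcases (ih ha.2).2 hh with ⟨s, t2, hst⟩
      exact ⟨y :: s, t2, by simp [hst]⟩

theorem pvR1 {a : List Char} (w : List Char) (ha : '.' ∉ a) :
    ['.', '*', '.'] <:+: '.' :: (a ++ '.' :: w) ↔ a = ['*'] ∨ ['.', '*', '.'] <:+: '.' :: w := by
  constructor
  · intro hh
    rcases (List.infix_cons_iff).1 hh with hp | hi
    · rw [List.cons_prefix_cons] at hp
      rcases hp with ⟨-, hp⟩
      cases a with
      | nil =>
        simp only [List.nil_append] at hp
        rw [List.cons_prefix_cons] at hp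
        simp at hp
      | cons y a' =>
        simp only [List.cons_append, List.cons_prefix_cons] at hp
        rcases hp with ⟨hy, hp⟩
        cases a' with
        | nil => exact Or.inl (by simp [← hy])
        | cons z a'' =>
          simp only [List.cons_append, List.cons_prefix_cons] at hp
          simp only [List.mem_cons, not_or] at ha
          exact absurd hp.1 ha.2.1
    · exact Or.inr ((pvR2 w ha).1 hi)
  · rintro (rfl | hh)
    · exact ⟨[], w, by simp⟩
    · exact hh.trans ⟨'.' :: a, [], by simp⟩

theorem pvL2 (v : List Char) :
    (∃ p ∈ pvSplit v, p = ['*']) ↔ ['.', '*', '.'] <:+: '.' :: v ++ ['.'] := by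
  induction hv : v.length using Nat.strong_induction_on generalizing v with
  | _ n ih =>
  rcases pvDecomp v with h | ⟨a, b, rfl, ha⟩
  · rw [pvSplit_no_dot h, pvR h]; simp [eq_comm]
  · rw [pvSplit_append b ha]
    have : ('.' :: (a ++ '.' :: b) ++ ['.']) = '.' :: (a ++ '.' :: (b ++ ['.'])) := by simp
    rw [this, pvR1 (b ++ ['.']) ha]
    have hb := ih b.length (by subst hv; simp; omega) b rfl
    rw [show '.' :: b ++ ['.'] = '.' :: (b ++ ['.']) from by simp] at hb
    rw [← hb]
    simp [eq_comm]
theorem pvUnique {a a' : List Char} {b b' : List Char} (h : a ++ '.' :: b = a' ++ '.' :: b')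
    (ha : '.' ∉ a) (ha' : '.' ∉ a') : a = a' ∧ b = b' := by
  induction a generalizing a' with
  | nil =>
    cases a' with
    | nil => simpa using h
    | cons y t =>
      simp only [List.nil_append, List.cons_append, List.cons.injEq] at h
      exact absurd (h.1 ▸ List.mem_cons_self) ha'
  | cons x t ih =>
    cases a' with
    | nil =>
      simp only [List.cons_append, List.nil_append, List.cons.injEq] at h
      exact absurd (h.1.symm ▸ List.mem_cons_self) ha
    | cons y t' =>
      simp only [List.cons_append, List.cons.injEq] at h
      simp only [List.mem_cons, not_or] at ha ha'
      obtain ⟨h1, h2⟩ := ih h.2 (by exact fun hm => ha.2 hm) (by exact fun hm => ha'.2 hm)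
      exact ⟨by rw [h.1, h1], h2⟩

theorem pvOfListInj {a b : List Char} (h : String.ofList a = String.ofList b) : a = b := by
  have := congrArg String.toList h
  simpa using this

theorem pvMapOfList {ps : List String} {X : List (List Char)}
    (h : ps.map String.toList = X) : ps = X.map String.ofList := by
  rw [← h, List.map_map]
  have : (String.ofList ∘ String.toList) = id := funext fun x => String.ofList_toList (s := x)
  simp [this]

theorem pvStrSplit_eq (s : String) :
    (PySem.Str.split? s ".").getD [] = (pvSplit s.toList).map String.ofList := by
  have h := PySem.Str.split?_map s "."
  rw [PySem.Chars.split?] at h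
  cases ho : PySem.Str.split? s "." with
  | none => rw [ho] at h; simp at h
  | some ps =>
    rw [ho] at h
    simp only [Option.map_some] at h
    rw [if_neg (by simp [show (".".toList : List Char) = ['.'] from rfl])] at h
    have h2 : ps.map String.toList = pvSplit s.toList := by
      have := Option.some.inj h
      rw [this, show (".".toList : List Char) = ['.'] from rfl, splitOn_eq_pvSplit]
    simp [pvMapOfList h2]

theorem pvStartswith_iff (s p : String) :
    PySem.Str.startswith s p = true ↔ p.toList <+: s.toList := by
  rw [PySem.Str.startswith_eq, PySem.Chars.startswith, List.isPrefixOf_iff_prefix]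

theorem pvResDot : ("resources.".toList : List Char) = "resources".toList ++ ['.'] := by decide

theorem pvGet0 {α : Type} (x : α) (xs : List α) : PySem.List.pyGet? (x :: xs) 0 = some x := by
  simp [PySem.List.pyGet?, PySem.List.pyIdx?]

theorem pvGet2 {α : Type} (x y z : α) (xs : List α) : PySem.List.pyGet? (x :: y :: z :: xs) 2 = some z := by
  simp [PySem.List.pyGet?, PySem.List.pyIdx?]
  rw [if_pos (by omega)]
  rfl

theorem pvMain (s : String) : field_yaml_path s = field_yaml_path_alt s := by
  have hsplit := pvStrSplit_eq s
  rcases pvDecomp s.toList with hnd | ⟨a, b, hl, ha⟩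
  · -- no dot at all: both none
    have hsw : PySem.Str.startswith s "resources." = false := by
      rw [Bool.eq_false_iff]
      intro hc
      exact hnd (((pvStartswith_iff s _).1 hc).subset (by decide))
    have hA : field_yaml_path s = none := by
      rw [field_yaml_path]
      rw [if_pos]
      rw [hsplit, pvSplit_no_dot hnd]
      left; simp
    rw [hA, field_yaml_path_alt, if_pos (by rw [hsw])]
  · by_cases hra : a = "resources".toList
    · subst hra
      -- the prefix matches
      have hsw : PySem.Str.startswith s "resources." = true := by
        rw [pvStartswith_iff, pvResDot, hl]
        exact ⟨b, by simp⟩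
      have hlenres : ("resources.".toList : List Char).length = 10 := by decide
      have hrestL : (PySem.Str.slice s (some (PySem.Str.len "resources.")) none).toList = b := by
        have h10 : PySem.Str.len "resources." = (10 : Int) := by decide
        rw [h10, PySem.Str.toList_slice, PySem.Chars.slice_eq_listSlice,
          PySem.List.slice_from s.toList (by norm_num)]
        rw [show ((10 : Int)).toNat = 10 from rfl]
        rw [hl, show ("resources".toList ++ '.' :: b : List Char) = "resources.".toList ++ b from by rw [pvResDot]; simp]
        exact List.drop_left' hlenres
      rw [field_yaml_path_alt, if_neg (by rw [hsw]; simp)]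
      simp only []
      rcases pvDecomp b with hnb | ⟨t, u, hbu, ht⟩
      · -- no second dot: both none
        have hdot : PySem.Str.find (PySem.Str.slice s (some (PySem.Str.len "resources.")) none) "." = -1 := by
          rw [PySem.Str.find_eq, hrestL, show (".".toList : List Char) = ['.'] from rfl]
          exact pvFind_no_dot hnb
        rw [if_pos (by rw [hdot]; left; rfl)]
        rw [field_yaml_path, if_pos]
        rw [hsplit, hl, pvSplit_append b (by decide), pvSplit_no_dot hnb]
        left; simp
      · -- second dot found at t.length
        have hdot : PySem.Str.find (PySem.Str.slice s (some (PySem.Str.len "resources.")) none) "." = (t.length : Int) := by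
          rw [PySem.Str.find_eq, hrestL, show (".".toList : List Char) = ['.'] from rfl, hbu]
          exact pvFind_first_dot u ht
        have hsliceU : (PySem.Str.slice (PySem.Str.slice s (some (PySem.Str.len "resources.")) none)
            (some ((t.length : Int) + 1)) none).toList = u := by
          rw [PySem.Str.toList_slice, PySem.Chars.slice_eq_listSlice,
            PySem.List.slice_from _ (by positivity), hrestL, hbu]
          rw [show (((t.length : Int)) + 1).toNat = t.length + 1 from by omega]
          rw [show (t ++ '.' :: u : List Char) = (t ++ ['.']) ++ u from by simp]
          exact List.drop_left' (by simp)
        by_cases hstar : ['*', '.'] <+: u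
        · -- "*." follows: the prefix shape matches
          obtain ⟨v, hv⟩ := hstar
          have hu' : u = ['*'] ++ '.' :: v := by rw [← hv]; rfl
          have hsw2 : PySem.Str.startswith (PySem.Str.slice (PySem.Str.slice s (some (PySem.Str.len "resources.")) none)
              (some ((t.length : Int) + 1)) none) "*." = true := by
            rw [pvStartswith_iff, hsliceU, ← hv]
            exact ⟨v, rfl⟩
          rw [hdot]
          rw [if_neg (by
            rintro (hc | hc)
            · omega
            · rw [hsw2] at hc; simp at hc)]
          have htailL : (PySem.Str.slice (PySem.Str.slice s (some (PySem.Str.len "resources.")) none)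
              (some ((t.length : Int) + 3)) none).toList = v := by
            rw [PySem.Str.toList_slice, PySem.Chars.slice_eq_listSlice,
              PySem.List.slice_from _ (by positivity), hrestL, hbu, hu']
            rw [show (((t.length : Int)) + 3).toNat = t.length + 3 from by omega]
            rw [show (t ++ '.' :: (['*'] ++ '.' :: v) : List Char) = (t ++ ['.', '*', '.']) ++ v from by simp]
            exact List.drop_left' (by simp)
          have hpartsA : (PySem.Str.split? s ".").getD [] =
              ("resources".toList :: t :: ['*'] :: pvSplit v).map String.ofList := by
            rw [hsplit, hl, pvSplit_append b (by decide), hbu, pvSplit_append u ht, hu',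
              pvSplit_append v (by decide)]
          rw [field_yaml_path]
          rw [if_neg (by
            rw [hpartsA]
            rintro (hc | hc | hc)
            · simp only [List.map_cons, List.length_cons, List.length_map] at hc
              have : 0 < (pvSplit v).length := List.length_pos_iff.mpr (pvSplit_ne_nil v)
              omega
            · simp only [List.map_cons] at hc
              rw [pvGet0] at hc
              exact hc rfl
            · simp only [List.map_cons] at hc
              rw [pvGet2] at hc
              exact hc rfl)]
          simp only []
          have hrem : PySem.List.slice ((PySem.Str.split? s ".").getD []) (some 3) none =
              (pvSplit v).map String.ofList := by
            rw [hpartsA, PySem.List.slice_from _ (by norm_num)]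
            rfl
          rw [hrem]
          rw [pvStrSplit_eq, htailL]
          have hBool : ((pvSplit v).map String.ofList).any (fun p => PySem.Str.isIn "[*]" p || p == "*") =
              (PySem.Str.isIn "[*]" (PySem.Str.slice (PySem.Str.slice s (some (PySem.Str.len "resources.")) none)
                (some ((t.length : Int) + 3)) none) ||
               PySem.Str.isIn ".*." ("." ++ (PySem.Str.slice (PySem.Str.slice s (some (PySem.Str.len "resources.")) none)
                (some ((t.length : Int) + 3)) none) ++ ".")) := by
            rw [Bool.eq_iff_iff]
            have helem : ∀ q : List Char,
                ((PySem.Str.isIn "[*]" (String.ofList q) || String.ofList q == "*") = true) ↔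
                  ((['[', '*', ']'] : List Char) <:+: q ∨ q = ['*']) := by
              intro q
              rw [Bool.or_eq_true, PySem.Str.isIn_iff_infix]
              constructor
              · rintro (h | h)
                · left; simpa using h
                · right
                  exact pvOfListInj (by rw [(beq_iff_eq).1 h])
              · rintro (h | h)
                · left; simpa using h
                · right; subst h; decide
            have hA_iff : (((pvSplit v).map String.ofList).any
                (fun p => PySem.Str.isIn "[*]" p || p == "*") = true) ↔
                (∃ q ∈ pvSplit v, (['[', '*', ']'] : List Char) <:+: q ∨ q = ['*']) := by
              rw [List.any_map, List.any_eq_true]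
              constructor
              · rintro ⟨q, hq, hqt⟩
                exact ⟨q, hq, (helem q).1 hqt⟩
              · rintro ⟨q, hq, hqt⟩
                exact ⟨q, hq, (helem q).2 hqt⟩
            rw [hA_iff, Bool.or_eq_true, PySem.Str.isIn_iff_infix, PySem.Str.isIn_iff_infix]
            rw [String.toList_append, String.toList_append, htailL]
            constructor
            · rintro ⟨q, hq, h | h⟩
              · left
                have := (pvL1 (sub := ['[', '*', ']']) v (by decide) (by decide)).2 ⟨q, hq, h⟩
                simpa using this
              · right
                have := (pvL2 v).1 ⟨q, hq, h⟩
                simpa using this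
            · rintro (h | h)
              · obtain ⟨q, hq, hqi⟩ := (pvL1 (sub := ['[', '*', ']']) v (by decide) (by decide)).1 (by simpa using h)
                exact ⟨q, hq, Or.inl hqi⟩
              · obtain ⟨q, hq, hq'⟩ := (pvL2 v).2 (by simpa using h)
                exact ⟨q, hq, Or.inr hq'⟩
          rw [hBool]
        · -- no "*." there: both none
          have hsw2 : PySem.Str.startswith (PySem.Str.slice (PySem.Str.slice s (some (PySem.Str.len "resources.")) none)
              (some ((t.length : Int) + 1)) none) "*." = false := by
            rw [Bool.eq_false_iff]
            intro hc
            rw [pvStartswith_iff, hsliceU] at hc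
            exact hstar (by simpa using hc)
          rw [hdot]
          rw [if_pos (Or.inr (by rw [hsw2]))]
          rw [field_yaml_path, if_pos]
          rw [hsplit, hl, pvSplit_append b (by decide), hbu, pvSplit_append u ht]
          rcases pvDecomp u with hnu | ⟨p, w, huw, hpd⟩
          · rw [pvSplit_no_dot hnu]
            left; simp
          · rw [huw, pvSplit_append w hpd]
            right; right
            simp only [List.map_cons]
            rw [pvGet2]
            intro hc
            have : p = "*".toList := pvOfListInj (by
              rw [Option.some.inj hc]
              exact (String.ofList_toList (s := "*")).symm)
            have hp' : p = ['*'] := by simpa using this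
            subst hp'
            exact hstar (by rw [huw]; exact ⟨w, rfl⟩)
    · -- first component is not "resources": both none
      have hsw : PySem.Str.startswith s "resources." = false := by
        rw [Bool.eq_false_iff]
        intro hc
        obtain ⟨r, hr⟩ := (pvStartswith_iff s _).1 hc
        rw [pvResDot] at hr
        rw [hl] at hr
        have : "resources".toList ++ '.' :: r = a ++ '.' :: b := by rw [← hr]; simp
        exact hra (pvUnique this (by decide) ha).1.symm
      have hA : field_yaml_path s = none := by
        rw [field_yaml_path, if_pos]
        rw [hsplit, hl, pvSplit_append b ha]
        right; left
        simp only [List.map_cons]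
        rw [pvGet0]
        intro hc
        exact hra (pvOfListInj (by
          rw [Option.some.inj hc]
          exact (String.ofList_toList (s := "resources")).symm))
      rw [hA, field_yaml_path_alt, if_pos (by rw [hsw])]

-- ===== VERDICT (by name: the statement is the Claim_ definition above) =====
theorem field_yaml_path_spec : Claim_equal_field_yaml_path := by
  intro field_path _
  show field_yaml_path field_path = field_yaml_path_alt field_path
  exact pvMain field_path
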